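-- pv_equiv track=rewrite | github.com/spectralDNS/mpiFFT4py | mpiFFT4py/pencil.py | _distribution2
-- ===== SOURCE A (Python) =====
-- def _distribution2(N, size):
--     q = N // size
--     r = N % size
--     n = s = i = 0
--     while i < size:
--         n = q
--         s = q * i
--         if i < r:
--             n += 1
--             s += i
--         else:
--             s += r
--         yield n, s
--         i += 1
-- ===== SOURCE B (Python) =====
-- def _distribution2(N, size):
--     q, r = divmod(N, size)
--     sizes = [q + 1] * r + [q] * (size - r)
--     s = 0
--     for n in sizes:
--         yield n, s
--         s += n
-- ===== Notes on version B (the rewrite author's own statement) =====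
-- stated objective: alternative
-- what changed: B first materialises the list of block sizes ([q+1]*r + [q]*(size-r)) and then pairs it with a prefix-sum scan of offsets, replacing A's index-driven while-loop with per-index closed-form offset q*i + (i if i<r else r).
import Mathlib
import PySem

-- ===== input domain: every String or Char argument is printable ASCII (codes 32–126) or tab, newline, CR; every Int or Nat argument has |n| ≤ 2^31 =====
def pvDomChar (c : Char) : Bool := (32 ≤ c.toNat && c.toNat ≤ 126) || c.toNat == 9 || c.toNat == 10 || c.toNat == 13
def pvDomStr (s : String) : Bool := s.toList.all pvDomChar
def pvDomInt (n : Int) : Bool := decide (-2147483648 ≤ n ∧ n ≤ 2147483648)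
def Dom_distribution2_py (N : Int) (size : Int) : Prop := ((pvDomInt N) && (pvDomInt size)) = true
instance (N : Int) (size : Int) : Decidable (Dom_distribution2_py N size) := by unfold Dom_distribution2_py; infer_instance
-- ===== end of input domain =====

-- ===== PORT A =====
-- B builds the block-size list ([q+1]*r + [q]*(size-r)) and pairs it with a prefix-sum
-- scan of offsets, instead of A's index-driven while-loop with closed-form offsets ("alternative").
-- while i < size: ...  (fuel = size.toNat bounds the iterations exactly)
def pyA_loop (q r size : Int) (i : Int) (fuel : Nat) : List (Int × Int) :=
  match fuel with
  | 0 => []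
  | Nat.succ fuel =>
    if i < size then
      let n := q
      let s := q * i
      let ns := if i < r then (n + 1, s + i) else (n, s + r)
      ns :: pyA_loop q r size (i + 1) fuel
    else []

def distribution2_py (N : Int) (size : Int) : List (Int × Int) :=
  let q := PySem.Int.floordiv N size
  let r := PySem.Int.mod N size
  pyA_loop q r size 0 size.toNat

-- ===== PORT B =====
-- for n in sizes: yield (n, s); s += n   (a scan pairing each block size with the running offset)
def pyB_scan (ns : List Int) (s : Int) : List (Int × Int) :=
  match ns with
  | [] => []
  | n :: rest => (n, s) :: pyB_scan rest (s + n)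

def distribution2_py_alt (N : Int) (size : Int) : List (Int × Int) :=
  let q := PySem.Int.floordiv N size
  let r := PySem.Int.mod N size
  let sizes := List.replicate r.toNat (q + 1) ++ List.replicate (size - r).toNat q
  pyB_scan sizes 0

-- ===== PRECONDITION & SPEC =====
-- Pre_ excludes exactly size = 0, where Python's divmod / N // size raises ZeroDivisionError.
def Pre_distribution2_py (N : Int) (size : Int) : Prop := size ≠ 0
instance (N : Int) (size : Int) : Decidable (Pre_distribution2_py N size) := by unfold Pre_distribution2_py; infer_instance
def pvWitness_distribution2_py : Int × Int := (7, 3)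
def Spec_distribution2_py (N : Int) (size : Int) (out : List (Int × Int)) : Prop := out = distribution2_py_alt N size
instance (N : Int) (size : Int) (out : List (Int × Int)) : Decidable (Spec_distribution2_py N size out) := by unfold Spec_distribution2_py; infer_instance

-- ===== CLAIM (what is proved, stated in full; the proofs are below) =====
def Claim_equal_distribution2_py : Prop := ∀ (N : Int) (size : Int), Dom_distribution2_py N size → Pre_distribution2_py N size → Spec_distribution2_py N size (distribution2_py N size)

-- ===== LEMMAS AND PROOFS =====
-- Phase 2: scanning m copies of q from offset q*i + r matches A's loop from index i ≥ r.
theorem scan_phase2 (q r size : Int) :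
    ∀ (m : Nat) (i : Int), r ≤ i → i + m = size →
      pyB_scan (List.replicate m q) (q * i + r) = pyA_loop q r size i m := by
  intro m
  induction m with
  | zero => intro i _ _; rfl
  | succ m ih =>
    intro i hri hsz
    have hlt : i < size := by omega
    have hnr : ¬ i < r := by omega
    simp only [List.replicate_succ, pyB_scan, pyA_loop, if_pos hlt, if_neg hnr]
    rw [show q * i + r + q = q * (i + 1) + r by ring,
        ih (i + 1) (by omega) (by push_cast at hsz ⊢; omega)]

-- Phase 1: scanning k copies of (q+1) then m copies of q from offset q*i + i matches
-- A's loop from index i, where i + k = r and r + m = size.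
theorem scan_phase1 (q r size : Int) (m : Nat) :
    ∀ (k : Nat) (i : Int), i + k = r → r + m = size →
      pyB_scan (List.replicate k (q + 1) ++ List.replicate m q) (q * i + i) = pyA_loop q r size i (k + m) := by
  intro k
  induction k with
  | zero =>
    intro i hir hrm
    have hi : i = r := by omega
    subst hi
    simpa using scan_phase2 q i size m i le_rfl (by omega)
  | succ k ih =>
    intro i hir hrm
    have hr : i < r := by push_cast at hir; omega
    have hlt : i < size := by push_cast at hir hrm; omega
    have hfuel : k + 1 + m = Nat.succ (k + m) := by omega
    simp only [hfuel, List.replicate_succ, List.cons_append, pyB_scan, pyA_loop,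
      if_pos hlt, if_pos hr]
    rw [show q * i + i + (q + 1) = q * (i + 1) + (i + 1) by ring,
        ih (i + 1) (by push_cast at hir ⊢; omega) hrm]

-- ===== VERDICT (by name: the statement is the Claim_ definition above) =====
theorem distribution2_py_spec : Claim_equal_distribution2_py := by
  intro N size _ hpre
  unfold Spec_distribution2_py distribution2_py distribution2_py_alt
  rcases lt_trichotomy size 0 with h | h | h
  · -- size < 0: A runs zero iterations; B's sizes list is empty (r ≤ 0 and size - r < 0)
    obtain ⟨hlo, hhi⟩ := PySem.Int.mod_neg_bounds N h
    have h1 : (PySem.Int.mod N size).toNat = 0 := by omega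
    have h2 : (size - PySem.Int.mod N size).toNat = 0 := by omega
    have h3 : size.toNat = 0 := by omega
    simp [h1, h2, h3, pyA_loop, pyB_scan]
  · exact absurd h hpre
  · -- size > 0: 0 ≤ r < size; apply phase 1 at i = 0
    have hr0 : 0 ≤ PySem.Int.mod N size := PySem.Int.mod_nonneg N h
    have hrs : PySem.Int.mod N size < size := PySem.Int.mod_lt N h
    have hk : ((PySem.Int.mod N size).toNat : Int) = PySem.Int.mod N size := by omega
    have hm : ((size - PySem.Int.mod N size).toNat : Int) = size - PySem.Int.mod N size := by omega
    have hfuel : (PySem.Int.mod N size).toNat + (size - PySem.Int.mod N size).toNat = size.toNat := by omega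
    have := scan_phase1 (PySem.Int.floordiv N size) (PySem.Int.mod N size) size
      (size - PySem.Int.mod N size).toNat (PySem.Int.mod N size).toNat 0
      (by rw [hk]; ring) (by rw [hm]; ring)
    rw [hfuel] at this
    simpa using this.symm
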